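-- pv_equiv track=rewrite | github.com/hiroto0222/CodeQuestions | AtCoder/ABC292/C.py | count_quadruples
-- ===== SOURCE A (Python) =====
-- from math import comb as binom
--
-- def count_quadruples(N):
--     if N % 2 == 1:
--         # AB + CD is odd, so there are no solutions
--         return 0
--
--     M = N // 2  # consider AB + CD = M instead
--
--     # compute the coefficient of x^M in G(x)
--     coef = 0
--     for k in range(1, int(M**0.5)+1):
--         if M % k == 0:
--             coef += k**2 * binom(2*k, k)**2
--             if k != M//k:
--                 coef += (M//k)**2 * binom(2*(M//k), M//k)**2
--
--     # multiply by 2^4 to get the total number of quadruples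
--     return coef * 16
-- ===== SOURCE B (Python) =====
-- from math import comb as binom
--
-- def count_quadruples(N):
--     if N % 2 == 1:
--         return 0
--     M = N // 2
--     total = 0
--     d = M
--     while d >= 1:
--         if M % d == 0:
--             total += d * d * binom(2 * d, d) ** 2
--         d -= 1
--     return total * 16
-- ===== Notes on version B (the rewrite author's own statement) =====
-- stated objective: simpler
-- what changed: Replaces the sqrt-bounded divisor-pair trick (adding f(k) and f(M//k) per small divisor, with a perfect-square guard) by a plain descending while-loop d = M..1 that adds d^2*C(2d,d)^2 once per divisor it finds.
-- crash fix: On negative even N, A raises TypeError (int() of a complex sqrt); B's while-loop never runs and it returns 0. — e.g. on count_quadruples(-2): A raises TypeError, B returns 0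
import Mathlib
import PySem

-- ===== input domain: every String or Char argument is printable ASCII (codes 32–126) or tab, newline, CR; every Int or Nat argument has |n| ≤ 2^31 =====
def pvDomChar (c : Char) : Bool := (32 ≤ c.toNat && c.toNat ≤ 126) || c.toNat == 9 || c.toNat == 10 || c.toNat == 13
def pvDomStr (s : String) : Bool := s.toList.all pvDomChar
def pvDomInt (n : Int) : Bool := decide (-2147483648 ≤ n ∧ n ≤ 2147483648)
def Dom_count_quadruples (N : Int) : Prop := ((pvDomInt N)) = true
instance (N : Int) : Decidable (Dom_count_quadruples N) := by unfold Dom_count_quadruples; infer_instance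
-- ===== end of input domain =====

-- B replaces A's sqrt-bounded divisor-pair enumeration by a plain descending
-- while-loop d = M..1 adding d^2*C(2d,d)^2 once per divisor (objective: simpler).


-- ===== PORT A =====
-- int(M**0.5) is ported as Nat.sqrt: exact for 0 ≤ M ≤ 2^30 (the double sqrt of such M
-- cannot cross an integer boundary); negative M (where Python raises) is outside Pre_.
def count_quadruples (N : Int) : Int :=
  if PySem.Int.mod N 2 = 1 then 0
  else
    let M := PySem.Int.floordiv N 2
    let coef := (PySem.List.pyRange 1 ((Nat.sqrt M.toNat : Int) + 1) 1).foldl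
      (fun coef k =>
        if PySem.Int.mod M k = 0 then
          let c := coef + k ^ 2 * ((Nat.choose (2 * k).toNat k.toNat : Int)) ^ 2
          if k ≠ PySem.Int.floordiv M k then
            c + (PySem.Int.floordiv M k) ^ 2 *
                ((Nat.choose (2 * PySem.Int.floordiv M k).toNat (PySem.Int.floordiv M k).toNat : Int)) ^ 2
          else c
        else coef) 0
    coef * 16

-- ===== PORT B =====
-- the while-loop 'while d >= 1: … ; d -= 1' as a countdown recursion on d (as a Nat),
-- threading the running total; d = 0 is the exit test d >= 1 failing
def pvWhileB (M : Int) : Nat → Int → Int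
  | 0, total => total
  | d + 1, total =>
      let k : Int := (d : Int) + 1
      pvWhileB M d
        (if PySem.Int.mod M k = 0 then
          total + k * k * ((Nat.choose (2 * k).toNat k.toNat : Int)) ^ 2
        else total)

def count_quadruples_alt (N : Int) : Int :=
  if PySem.Int.mod N 2 = 1 then 0
  else
    let M := PySem.Int.floordiv N 2
    pvWhileB M M.toNat 0 * 16

-- ===== PRECONDITION & SPEC =====
-- Pre_ excludes exactly the inputs where A raises: negative even N (int(M**0.5) of a
-- negative M is a complex number, so int() raises TypeError).
def Pre_count_quadruples (N : Int) : Prop := PySem.Int.mod N 2 = 1 ∨ 0 ≤ N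
instance (N : Int) : Decidable (Pre_count_quadruples N) := by unfold Pre_count_quadruples; infer_instance
def pvWitness_count_quadruples : Int := 12

-- On negative even N, A raises TypeError (int() of a complex sqrt); B's while-loop never runs and it returns 0.
def Raises_count_quadruples (N : Int) : Prop := PySem.Int.mod N 2 = 0 ∧ N < 0
instance (N : Int) : Decidable (Raises_count_quadruples N) := by unfold Raises_count_quadruples; infer_instance
def pvRaiseWitness_count_quadruples : Int := -2
def pvRaiseWitnessOut_count_quadruples : Int := 0

def Spec_count_quadruples (N : Int) (out : Int) : Prop := out = count_quadruples_alt N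
instance (N : Int) (out : Int) : Decidable (Spec_count_quadruples N out) := by unfold Spec_count_quadruples; infer_instance

-- ===== CLAIM (what is proved, stated in full; the proofs are below) =====
def Claim_equal_count_quadruples : Prop := ∀ (N : Int), Dom_count_quadruples N → Pre_count_quadruples N → Spec_count_quadruples N (count_quadruples N)
def Claim_raises_count_quadruples : Prop := (∀ (N : Int), Dom_count_quadruples N → Raises_count_quadruples N → ¬ Pre_count_quadruples N) ∧ (Dom_count_quadruples (pvRaiseWitness_count_quadruples) ∧ Raises_count_quadruples (pvRaiseWitness_count_quadruples) ∧ count_quadruples_alt (pvRaiseWitness_count_quadruples) = pvRaiseWitnessOut_count_quadruples)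

-- ===== LEMMAS AND PROOFS =====

-- the summand both loops accumulate (per divisor k of m)
def pvF (k : Nat) : Int := (k : Int) ^ 2 * ((Nat.choose (2 * k) k : Int)) ^ 2

-- bridges a List.range sum to a Finset sum
theorem pvSum_range (F : ℕ → Int) (n : ℕ) : ((List.range n).map F).sum = ∑ j ∈ Finset.range n, F j := rfl

-- B's while-loop as a Finset sum
theorem pvWhileB_sum (m : Nat) :
    ∀ (n : Nat) (total : Int),
      pvWhileB (m : Int) n total = total + ∑ k ∈ Finset.Icc 1 n, (if k ∣ m then pvF k else 0) := by
  intro n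
  induction n with
  | zero => intro total; simp [pvWhileB]
  | succ d ih =>
    intro total
    rw [pvWhileB, ih]
    rw [Finset.sum_Icc_succ_top (by omega : 1 ≤ d + 1)]
    have hc : ((d : Int) + 1) = ((d + 1 : ℕ) : Int) := by push_cast; ring
    simp only [hc]
    rw [show (2 * ((d+1 : ℕ) : Int)) = ((2*(d+1) : ℕ) : Int) by push_cast; ring]
    rw [PySem.Int.mod_natCast, Int.toNat_natCast, Int.toNat_natCast]
    have hcond : ((m % (d+1) : ℕ) : Int) = 0 ↔ (d+1) ∣ m := by
      rw [Nat.cast_eq_zero, Nat.dvd_iff_mod_eq_zero]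
    rw [if_congr hcond rfl rfl]
    split_ifs with h
    · unfold pvF; push_cast; ring
    · ring

-- A's loop as a Finset sum
theorem pvA_sum (m : Nat) :
    (PySem.List.pyRange 1 ((Nat.sqrt m : Int) + 1) 1).foldl
      (fun coef k =>
        if PySem.Int.mod (m : Int) k = 0 then
          let c := coef + k ^ 2 * ((Nat.choose (2 * k).toNat k.toNat : Int)) ^ 2
          if k ≠ PySem.Int.floordiv (m : Int) k then
            c + (PySem.Int.floordiv (m : Int) k) ^ 2 *
                ((Nat.choose (2 * PySem.Int.floordiv (m : Int) k).toNat (PySem.Int.floordiv (m : Int) k).toNat : Int)) ^ 2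
          else c
        else coef) 0
    = ∑ k ∈ Finset.Icc 1 (Nat.sqrt m),
        if k ∣ m then pvF k + (if k ≠ m / k then pvF (m / k) else 0) else 0 := by
  have hstep : (fun (coef k : Int) =>
      if PySem.Int.mod (m : Int) k = 0 then
        let c := coef + k ^ 2 * ((Nat.choose (2 * k).toNat k.toNat : Int)) ^ 2
        if k ≠ PySem.Int.floordiv (m : Int) k then
          c + (PySem.Int.floordiv (m : Int) k) ^ 2 *
              ((Nat.choose (2 * PySem.Int.floordiv (m : Int) k).toNat (PySem.Int.floordiv (m : Int) k).toNat : Int)) ^ 2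
        else c
      else coef)
      = fun coef k => coef + (if PySem.Int.mod (m : Int) k = 0 then
          k ^ 2 * ((Nat.choose (2 * k).toNat k.toNat : Int)) ^ 2 +
          (if k ≠ PySem.Int.floordiv (m : Int) k then
            (PySem.Int.floordiv (m : Int) k) ^ 2 *
              ((Nat.choose (2 * PySem.Int.floordiv (m : Int) k).toNat (PySem.Int.floordiv (m : Int) k).toNat : Int)) ^ 2
          else 0) else 0) := by
    funext c k; simp only []; split_ifs <;> ring
  rw [hstep, PySem.List.foldl_add, PySem.List.pyRange_one, List.map_map, zero_add]
  have h1 : ((Nat.sqrt m : Int) + 1 - 1).toNat = Nat.sqrt m := by omega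
  rw [h1, pvSum_range]
  rw [show Finset.Icc 1 (Nat.sqrt m) = Finset.Ico 1 (Nat.sqrt m + 1) by rfl, Finset.sum_Ico_eq_sum_range]
  have h2 : Nat.sqrt m + 1 - 1 = Nat.sqrt m := by omega
  rw [h2]
  apply Finset.sum_congr rfl
  intro j hj
  simp only [Nat.add_comm 1 j]
  have hc : (1 + (j : Int)) = ((j + 1 : ℕ) : Int) := by push_cast; ring
  simp only [Function.comp, hc]
  rw [show (2 * ((j+1 : ℕ) : Int)) = ((2*(j+1) : ℕ) : Int) by push_cast; ring]
  rw [PySem.Int.mod_natCast, PySem.Int.floordiv_natCast, Int.toNat_natCast, Int.toNat_natCast]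
  rw [show (2 * ((m/(j+1) : ℕ) : Int)) = ((2*(m/(j+1)) : ℕ) : Int) by push_cast; ring]
  rw [Int.toNat_natCast, Int.toNat_natCast]
  have hcond : ((m % (j+1) : ℕ) : Int) = 0 ↔ (j+1) ∣ m := by
    rw [Nat.cast_eq_zero, Nat.dvd_iff_mod_eq_zero]
  have hne : (((j+1 : ℕ) : Int) ≠ ((m/(j+1) : ℕ) : Int)) ↔ (j+1) ≠ m/(j+1) := by
    constructor <;> (intro h h2; exact h (by exact_mod_cast h2))
  rw [if_congr hcond rfl rfl, if_congr hne rfl rfl]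
  split_ifs with h h3
  · unfold pvF; push_cast; ring
  · unfold pvF; push_cast; ring
  · rfl

-- the divisor-pair trick: summing f over small divisors plus their cofactors
-- equals summing f over all divisors
theorem pvPair_sum (m : Nat) (f : Nat → Int) :
    ∑ k ∈ Finset.Icc 1 (Nat.sqrt m),
        (if k ∣ m then f k + (if k ≠ m / k then f (m / k) else 0) else 0)
    = ∑ k ∈ Finset.Icc 1 m, if k ∣ m then f k else 0 := by
  by_cases hm : m = 0
  · subst hm; simp
  have hm0 : 0 < m := Nat.pos_of_ne_zero hm
  set s := Nat.sqrt m with hs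
  have hs2 : m < (s + 1) * (s + 1) := Nat.lt_succ_sqrt m
  have hs1 : s * s ≤ m := by have := Nat.sqrt_le' m; nlinarith [this]
  have factA : ∀ k, k ∣ m → k ≤ s → k ≠ m / k → s < m / k := by
    intro k hdvd hks hne
    by_contra hle
    push Not at hle
    have hk0 : 0 < k := Nat.pos_of_dvd_of_pos hdvd hm0
    have heq : k * (m / k) = m := Nat.mul_div_cancel' hdvd
    have h1 : k * (m / k) ≤ k * s := Nat.mul_le_mul_left k hle
    have h2 : k * s ≤ s * s := Nat.mul_le_mul_right s hks
    have hks2 : k * s = s * s := by omega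
    have hs0 : 0 < s := by nlinarith
    have hkeq : k = s := Nat.eq_of_mul_eq_mul_right hs0 hks2
    have : k * (m / k) = k * s := by omega
    have : m / k = s := Nat.eq_of_mul_eq_mul_left hk0 this
    exact hne (by omega)
  have factB : ∀ d, d ∣ m → s < d → m / d ≤ s := by
    intro d hdvd hsd
    have h1 : m / d ≤ m / (s + 1) := Nat.div_le_div_left (by omega) (by omega)
    have h2 : m / (s + 1) < s + 1 := (Nat.div_lt_iff_lt_mul (by omega)).mpr (by nlinarith)
    omega
  conv_rhs => rw [← Finset.sum_filter]
  have hset : (Finset.Icc 1 m).filter (· ∣ m) = m.divisors := by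
    ext k
    simp only [Finset.mem_filter, Finset.mem_Icc, Nat.mem_divisors]
    constructor
    · rintro ⟨⟨_, _⟩, h⟩; exact ⟨h, hm⟩
    · rintro ⟨h, _⟩
      exact ⟨⟨Nat.pos_of_dvd_of_pos h hm0, Nat.le_of_dvd hm0 h⟩, h⟩
  rw [hset]
  have hsum : ∀ k, (if k ∣ m then f k + (if k ≠ m / k then f (m / k) else 0) else 0)
      = (if k ∣ m then f k else 0) + (if k ∣ m ∧ k ≠ m / k then f (m / k) else 0) := by
    intro k; by_cases h : k ∣ m <;> by_cases h2 : k ≠ m / k <;> simp [h, h2]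
  simp only [hsum]
  rw [Finset.sum_add_distrib, ← Finset.sum_filter, ← Finset.sum_filter]
  have hsmall : (Finset.Icc 1 s).filter (· ∣ m) = m.divisors.filter (· ≤ s) := by
    ext k
    simp only [Finset.mem_filter, Finset.mem_Icc, Nat.mem_divisors]
    constructor
    · rintro ⟨⟨_, h2⟩, h⟩; exact ⟨⟨h, hm⟩, h2⟩
    · rintro ⟨⟨h, _⟩, h2⟩
      exact ⟨⟨Nat.pos_of_dvd_of_pos h hm0, h2⟩, h⟩
  rw [hsmall]
  rw [← Finset.sum_filter_add_sum_filter_not m.divisors (· ≤ s) f]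
  congr 1
  apply Finset.sum_nbij' (i := fun k => m / k) (j := fun d => m / d)
  · intro k hk
    simp only [Finset.mem_filter, Finset.mem_Icc, Nat.mem_divisors] at hk ⊢
    obtain ⟨⟨hk1, hks⟩, hdvd, hne⟩ := hk
    exact ⟨⟨Nat.div_dvd_of_dvd hdvd, hm⟩, by have := factA k hdvd hks hne; omega⟩
  · intro d hd
    simp only [Finset.mem_filter, Finset.mem_Icc, Nat.mem_divisors] at hd ⊢
    obtain ⟨⟨hdvd, _⟩, hds⟩ := hd
    push Not at hds
    have hdd := Nat.div_div_self hdvd hm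
    have hpos : 0 < m / d := Nat.div_pos (Nat.le_of_dvd hm0 hdvd) (by omega)
    exact ⟨⟨hpos, factB d hdvd hds⟩, Nat.div_dvd_of_dvd hdvd, by rw [hdd]; have := factB d hdvd hds; omega⟩
  · intro k hk
    simp only [Finset.mem_filter, Finset.mem_Icc] at hk
    exact Nat.div_div_self hk.2.1 hm
  · intro d hd
    simp only [Finset.mem_filter, Nat.mem_divisors] at hd
    exact Nat.div_div_self hd.1.1 hm
  · intro k hk; rfl

-- ===== VERDICT (by name: the statement is the Claim_ definition above) =====
theorem count_quadruples_spec : Claim_equal_count_quadruples := by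
  intro N _ hpre
  unfold Spec_count_quadruples count_quadruples count_quadruples_alt
  by_cases hodd : PySem.Int.mod N 2 = 1
  · simp only [hodd]; simp
  · simp only [hodd, if_false]
    rcases hpre with h | hN
    · exact absurd h hodd
    · obtain ⟨m, hm⟩ : ∃ m : Nat, PySem.Int.floordiv N 2 = (m : Int) := by
        refine ⟨(PySem.Int.floordiv N 2).toNat, ?_⟩
        have : 0 ≤ PySem.Int.floordiv N 2 := by
          rw [PySem.Int.floordiv_eq_ediv_of_pos (by omega)]; omega
        omega
      rw [hm]
      have ht : ((m : Int)).toNat = m := by omega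
      rw [ht, pvA_sum, pvPair_sum, pvWhileB_sum, zero_add]

@[simp] theorem count_quadruples_raises : Claim_raises_count_quadruples := by
  unfold Claim_raises_count_quadruples
  constructor
  · intro N _ ⟨h0, hneg⟩ hpre
    rcases hpre with h1 | h2
    · rw [h0] at h1; exact absurd h1 (by decide)
    · omega
  · refine ⟨by decide, by decide, by decide⟩
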